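-- pv_equiv track=rewrite | github.com/MiyaHui/Harness-DB-CodeMind | codemind/deterministic/sql_parser.py | _split_select_columns
-- ===== SOURCE A (Python) =====
-- def _split_select_columns(select_clause: str) -> list[str]:
--     columns: list[str] = []
--     depth = 0
--     current = ""
--
--     for char in select_clause:
--         if char == '(':
--             depth += 1
--         elif char == ')':
--             depth -= 1
--         elif char == ',' and depth == 0:
--             columns.append(current.strip())
--             current = ""
--             continue
--         current += char
--
--     if current.strip():
--         columns.append(current.strip())
--
--     return columns
-- ===== SOURCE B (Python) =====
-- def _split_select_columns(select_clause: str) -> list[str]: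
--     # Pass 1: record the index of every comma at parenthesis depth 0.
--     depth = 0
--     cuts = []
--     for i, char in enumerate(select_clause):
--         if char == '(':
--             depth += 1
--         elif char == ')':
--             depth -= 1
--         elif char == ',' and depth == 0:
--             cuts.append(i)
--     # Pass 2: slice the clause at those indices.
--     parts = []
--     start = 0
--     for c in cuts:
--         parts.append(select_clause[start:c].strip())
--         start = c + 1
--     tail = select_clause[start:].strip()
--     if tail:
--         parts.append(tail)
--     return parts
-- ===== Notes on version B (the rewrite author's own statement) =====
-- stated objective: alternative
-- what changed: Replaces A's single pass that accumulates the current segment character by character with a two-pass scheme: first collect the indices of depth-0 commas, then slice the string at those indices.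
import Mathlib
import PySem

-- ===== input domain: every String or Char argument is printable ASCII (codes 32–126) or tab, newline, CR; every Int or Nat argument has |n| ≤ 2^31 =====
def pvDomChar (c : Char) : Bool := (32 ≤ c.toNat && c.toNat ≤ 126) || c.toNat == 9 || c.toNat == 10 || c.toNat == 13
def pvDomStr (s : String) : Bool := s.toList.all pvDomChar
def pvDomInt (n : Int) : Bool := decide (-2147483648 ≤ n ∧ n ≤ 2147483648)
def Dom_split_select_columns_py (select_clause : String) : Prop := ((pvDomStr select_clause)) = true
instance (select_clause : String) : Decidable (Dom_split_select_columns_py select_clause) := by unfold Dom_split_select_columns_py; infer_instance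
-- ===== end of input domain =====

-- B collects the depth-0 comma indices in one pass and slices the string in a second pass,
-- instead of A's single pass accumulating the current segment character by character. Same cost.

-- ===== PORT A =====
-- the loop body of A: state (columns, depth, current)
def stepA (st : List String × Int × List Char) (c : Char) : List String × Int × List Char :=
  if c = '(' then (st.1, st.2.1 + 1, st.2.2 ++ [c])
  else if c = ')' then (st.1, st.2.1 - 1, st.2.2 ++ [c])
  else if c = ',' ∧ st.2.1 = 0 then
    (st.1 ++ [String.ofList (PySem.Chars.strip st.2.2)], st.2.1, [])
  else (st.1, st.2.1, st.2.2 ++ [c])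

def split_select_columns_py (select_clause : String) : List String :=
  let fin := select_clause.toList.foldl stepA ([], 0, [])
  if PySem.Chars.strip fin.2.2 ≠ [] then fin.1 ++ [String.ofList (PySem.Chars.strip fin.2.2)]
  else fin.1

-- ===== PORT B =====
-- pass 1 loop body: state (cuts, depth)
def stepB1 (st : List Int × Int) (p : Int × Char) : List Int × Int :=
  if p.2 = '(' then (st.1, st.2 + 1)
  else if p.2 = ')' then (st.1, st.2 - 1)
  else if p.2 = ',' ∧ st.2 = 0 then (st.1 ++ [p.1], st.2)
  else st

-- pass 2 loop body: state (parts, start), slicing cs at each cut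
def stepB2 (cs : List Char) (st : List String × Int) (c : Int) : List String × Int :=
  (st.1 ++ [String.ofList (PySem.Chars.strip (PySem.List.slice cs (some st.2) (some c)))], c + 1)

def split_select_columns_py_alt (select_clause : String) : List String :=
  let cs := select_clause.toList
  let cuts := ((PySem.List.enumerate cs 0).foldl stepB1 ([], 0)).1
  let fin := cuts.foldl (stepB2 cs) ([], 0)
  let tail := PySem.Chars.strip (PySem.List.slice cs (some fin.2) none)
  if tail ≠ [] then fin.1 ++ [String.ofList tail]
  else fin.1

-- ===== PRECONDITION & SPEC =====
def Spec_split_select_columns_py (select_clause : String) (out : List String) : Prop := out = split_select_columns_py_alt select_clause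
instance (select_clause : String) (out : List String) : Decidable (Spec_split_select_columns_py select_clause out) := by unfold Spec_split_select_columns_py; infer_instance

-- ===== CLAIM (what is proved, stated in full; the proofs are below) =====
def Claim_equal_split_select_columns_py : Prop := ∀ (select_clause : String), Dom_split_select_columns_py select_clause → Spec_split_select_columns_py select_clause (split_select_columns_py select_clause)

-- ===== LEMMAS AND PROOFS =====

-- common recursive specification: (stripped segments emitted at depth-0 commas, final current)
def bodyA : List Char → Int → List Char → (List (List Char) × List Char)
  | [], _, cur => ([], cur)
  | c :: cs, d, cur =>
    if c = '(' then bodyA cs (d + 1) (cur ++ [c])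
    else if c = ')' then bodyA cs (d - 1) (cur ++ [c])
    else if c = ',' ∧ d = 0 then
      let r := bodyA cs d []
      (PySem.Chars.strip cur :: r.1, r.2)
    else bodyA cs d (cur ++ [c])

-- absolute positions of depth-0 commas, scanning cs which starts at index s
def cutsF : List Char → Nat → Int → List Nat
  | [], _, _ => []
  | c :: cs, s, d =>
    if c = '(' then cutsF cs (s + 1) (d + 1)
    else if c = ')' then cutsF cs (s + 1) (d - 1)
    else if c = ',' ∧ d = 0 then s :: cutsF cs (s + 1) d
    else cutsF cs (s + 1) d

theorem foldA_eq (cs : List Char) : ∀ (cols : List String) (d : Int) (cur : List Char),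
    (cs.foldl stepA (cols, d, cur)).1 = cols ++ (bodyA cs d cur).1.map String.ofList
    ∧ (cs.foldl stepA (cols, d, cur)).2.2 = (bodyA cs d cur).2 := by
  induction cs with
  | nil => intro cols d cur; simp [bodyA]
  | cons c cs ih =>
    intro cols d cur
    simp only [List.foldl_cons, bodyA, stepA]
    by_cases h1 : c = '('
    · simpa [h1] using ih cols (d + 1) (cur ++ [c])
    · by_cases h2 : c = ')'
      · simpa [h1, h2] using ih cols (d - 1) (cur ++ [c])
      · by_cases h3 : c = ',' ∧ d = 0
        · obtain ⟨i1, i2⟩ := ih (cols ++ [String.ofList (PySem.Chars.strip cur)]) d []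
          simp only [if_neg h1, if_neg h2, if_pos h3]
          exact ⟨by rw [i1]; simp, by rw [i2]⟩
        · simpa [h1, h2, h3] using ih cols d (cur ++ [c])

theorem cutsB_eq (cs : List Char) : ∀ (acc : List Int) (s : Nat) (d : Int),
    ((PySem.List.enumerate cs (s : Int)).foldl stepB1 (acc, d)).1
      = acc ++ (cutsF cs s d).map (fun n : Nat => (n : Int)) := by
  induction cs with
  | nil => intro acc s d; simp [PySem.List.enumerate_nil, cutsF]
  | cons c cs ih =>
    intro acc s d
    rw [PySem.List.enumerate_cons]
    simp only [List.foldl_cons, stepB1, cutsF]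
    by_cases h1 : c = '('
    · simpa [h1, Nat.cast_add] using ih acc (s + 1) (d + 1)
    · by_cases h2 : c = ')'
      · simpa [h1, h2, Nat.cast_add] using ih acc (s + 1) (d - 1)
      · by_cases h3 : c = ',' ∧ d = 0
        · simp only [if_neg h1, if_neg h2, if_pos h3]
          rw [show ((s : Int) + 1) = ((s + 1 : Nat) : Int) by push_cast; ring]
          rw [ih (acc ++ [(s : Int)]) (s + 1) d]; simp
        · simp only [if_neg h1, if_neg h2, if_neg h3]
          rw [show ((s : Int) + 1) = ((s + 1 : Nat) : Int) by push_cast; ring]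
          exact ih acc (s + 1) d

theorem secondPass (full : List Char) : ∀ (cs : List Char) (d : Int) (start s : Nat) (acc : List String),
    start ≤ s → s ≤ full.length → full.drop s = cs →
    ((cutsF cs s d).foldl
        (fun (st : List String × Int) (c : Nat) => stepB2 full st (c : Int))
        (acc, (start : Int))).1
      = acc ++ (bodyA cs d ((full.drop start).take (s - start))).1.map String.ofList
    ∧ ∃ start' : Nat,
        ((cutsF cs s d).foldl
          (fun (st : List String × Int) (c : Nat) => stepB2 full st (c : Int))
          (acc, (start : Int))).2 = (start' : Int)
        ∧ start' ≤ full.length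
        ∧ full.drop start' = (bodyA cs d ((full.drop start).take (s - start))).2 := by
  intro cs
  induction cs with
  | nil =>
    intro d start s acc h1 h2 h3
    have hs : s = full.length := by
      have := List.drop_eq_nil_iff.mp h3
      omega
    constructor
    · simp [cutsF, bodyA]
    · refine ⟨start, by simp [cutsF], by omega, ?_⟩
      simp only [bodyA]
      rw [List.take_of_length_le (by simp; omega)]
  | cons c cs ih =>
    intro d start s acc h1 h2 h3
    have hslen : s < full.length := by
      by_contra h
      rw [List.drop_eq_nil_iff.mpr (by omega)] at h3
      exact List.cons_ne_nil _ _ h3.symm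
    have hcurlen : ((full.drop start).take (s - start)).length = s - start := by
      simp; omega
    have hfs : full.drop start = (full.drop start).take (s - start) ++ c :: cs := by
      conv_lhs => rw [← List.take_append_drop (s - start) (full.drop start)]
      rw [List.drop_drop, show start + (s - start) = s by omega, h3]
    have hd1 : full.drop (s + 1) = cs := by
      rw [← List.tail_drop, h3]; rfl
    have hext : (full.drop start).take (s + 1 - start) = (full.drop start).take (s - start) ++ [c] := by
      conv_lhs => rw [hfs]
      rw [show s + 1 - start = ((full.drop start).take (s - start)).length + 1 by omega,
        List.take_append]
      simp
    simp only [cutsF, bodyA]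
    by_cases hc1 : c = '('
    · simp only [if_pos hc1]
      have H := ih (d + 1) start (s + 1) acc (by omega) (by omega) hd1
      rw [hext] at H
      exact H
    · by_cases hc2 : c = ')'
      · simp only [if_neg hc1, if_pos hc2]
        have H := ih (d - 1) start (s + 1) acc (by omega) (by omega) hd1
        rw [hext] at H
        exact H
      · by_cases hc3 : c = ',' ∧ d = 0
        · simp only [if_neg hc1, if_neg hc2, if_pos hc3, List.foldl_cons]
          have hstep : stepB2 full (acc, (start : Int)) (s : Int)
              = (acc ++ [String.ofList (PySem.Chars.strip ((full.drop start).take (s - start)))],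
                 ((s + 1 : Nat) : Int)) := by
            simp [stepB2, PySem.List.slice_natCast]
          rw [hstep]
          have H := ih d (s + 1) (s + 1) (acc ++ [String.ofList (PySem.Chars.strip ((full.drop start).take (s - start)))]) (by omega) (by omega) hd1
          simp only [Nat.sub_self, List.take_zero] at H
          obtain ⟨H1, start', H2, H3, H4⟩ := H
          refine ⟨?_, start', H2, H3, ?_⟩
          · rw [H1]; simp
          · rw [H4]
        · simp only [if_neg hc1, if_neg hc2, if_neg hc3]
          have H := ih d start (s + 1) acc (by omega) (by omega) hd1
          rw [hext] at H
          exact H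

-- ===== VERDICT (by name: the statement is the Claim_ definition above) =====
theorem split_select_columns_py_spec : Claim_equal_split_select_columns_py := by
  intro s _
  unfold Spec_split_select_columns_py split_select_columns_py split_select_columns_py_alt
  obtain ⟨a1, a2⟩ := foldA_eq s.toList [] 0 []
  have hcuts : ((PySem.List.enumerate s.toList 0).foldl stepB1 ([], 0)).1
      = (cutsF s.toList 0 0).map (fun n : Nat => (n : Int)) := by
    have h := cutsB_eq s.toList [] 0 0
    simp only [Nat.cast_zero, List.nil_append] at h
    exact h
  obtain ⟨b1, start', b2, b3, b4⟩ :=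
    secondPass s.toList s.toList 0 0 0 [] (le_refl 0) (Nat.zero_le _) (by simp)
  simp only [Nat.sub_self, List.take_zero, List.drop_zero, Nat.cast_zero, List.nil_append] at b1 b2 b4
  have hfold2 : (((cutsF s.toList 0 0).map (fun n : Nat => (n : Int))).foldl (stepB2 s.toList) ([], (0 : Int)))
      = ((cutsF s.toList 0 0).foldl (fun (st : List String × Int) (c : Nat) => stepB2 s.toList st (c : Int)) ([], (0 : Int))) := by
    rw [List.foldl_map]
  have htail : PySem.List.slice s.toList
      (some (((cutsF s.toList 0 0).foldl (fun (st : List String × Int) (c : Nat) => stepB2 s.toList st (c : Int)) ([], (0 : Int))).2)) none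
      = (bodyA s.toList 0 []).2 := by
    rw [b2, PySem.List.slice_from_natCast]
    exact b4
  simp only [hcuts, hfold2, htail, a1, a2, b1, List.nil_append]
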